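-- pv_equiv track=rewrite | github.com/madelinelyons/CrackingTheCodingInterview | interviewChapter5.py | getPrev
-- ===== SOURCE A (Python) =====
-- def getPrev(num):
--     temp = num
--     c0 = 0
--     c1 = 0
--     while (temp & 1 == 1):
--         c1 += 1
--         temp >>= 1
--
--     if temp == 0:
--         return -1
--
--     while((temp&1) == 0) and (temp != 0):
--         c0 += 1
--         temp >>= 1
--
--     p = c0 + c1
--     num &= ((~0) << (p + 1))
--
--     mask = (1 << (c1 + 1)) - 1
--     num |= mask << (c0 - 1)
--
--     return bin(num)
-- ===== SOURCE B (Python) =====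
-- def getPrev(num):
--     # Closed-form, loop-free: num = X 1 0^c0 1^c1 in binary; the previous number
--     # with the same bit count is X 0 1^(c1+1) 0^(c0-1) = m - v // (2 * u), where
--     # u = 2^c1 and v = 2^(c0+c1) are isolated low set bits and m = num - u + 1.
--     x = num + 1
--     u = x - (x & (x - 1))      # lowest set bit of num + 1, i.e. 2**c1
--     m = num - u + 1            # num with its trailing ones cleared
--     if m == 0:
--         return -1              # 0, -1 or 2**k - 1: no smaller number with the same bit count
--     v = m - (m & (m - 1))      # lowest set bit of m, i.e. 2**(c0+c1)
--     return bin(m - v // (2 * u))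
-- ===== Notes on version B (the rewrite author's own statement) =====
-- stated objective: simpler
-- what changed: A counts trailing ones and zeros with two shift loops and rebuilds the number with hand-made masks; B is loop-free, isolating the lowest set bits of num+1 and of the cleared number via the x&(x-1) trick and combining them with one subtraction and one division.
-- outside the precondition, e.g. on getPrev(0): A returns -1, B returns -1; on getPrev(1): A returns -1, B returns -1; on getPrev(7): A returns -1, B returns -1
import Mathlib
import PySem

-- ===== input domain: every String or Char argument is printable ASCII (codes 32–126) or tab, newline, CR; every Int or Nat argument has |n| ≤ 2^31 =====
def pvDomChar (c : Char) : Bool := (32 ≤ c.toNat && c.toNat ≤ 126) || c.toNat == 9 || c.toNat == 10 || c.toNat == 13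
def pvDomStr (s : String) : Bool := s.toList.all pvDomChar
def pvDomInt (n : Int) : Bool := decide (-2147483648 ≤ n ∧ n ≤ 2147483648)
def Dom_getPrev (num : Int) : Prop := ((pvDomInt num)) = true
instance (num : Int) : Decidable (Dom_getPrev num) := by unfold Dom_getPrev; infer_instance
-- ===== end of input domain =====

-- B replaces A's two counting loops and hand-built masks by closed-form
-- lowest-set-bit arithmetic (x & (x-1)); equivalence is claimed on the inputs
-- where the Python A returns a binary string (Pre_ below).

-- ===== PORT A =====
-- 'while (temp & 1 == 1): c1 += 1; temp >>= 1' — fuel-guarded (64 steps are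
-- ample on Dom, |num| ≤ 2^31; the fuel only makes the recursion total).
def getPrevLoop1 : Nat → Int → Int → Int × Int
  | 0, temp, c1 => (temp, c1)
  | f + 1, temp, c1 =>
      if PySem.Int.band temp 1 = 1 then getPrevLoop1 f (temp >>> (1:Nat)) (c1 + 1)
      else (temp, c1)

-- 'while ((temp & 1) == 0) and (temp != 0): c0 += 1; temp >>= 1' — fuel-guarded.
def getPrevLoop2 : Nat → Int → Int → Int × Int
  | 0, temp, c0 => (temp, c0)
  | f + 1, temp, c0 =>
      if PySem.Int.band temp 1 = 0 ∧ temp ≠ 0 then getPrevLoop2 f (temp >>> (1:Nat)) (c0 + 1)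
      else (temp, c0)

def getPrev (num : Int) : String :=
  let (temp, c1) := getPrevLoop1 64 num 0
  if temp = 0 then "-1"  -- Python returns the int -1 here (not a str): outside Pre_
  else
    let (_, c0) := getPrevLoop2 64 temp 0
    let p := c0 + c1
    -- num &= ((~0) << (p + 1));  shift amounts are nonnegative, so .toNat is exact
    let num1 := PySem.Int.band num ((Int.not 0) <<< (p + 1).toNat)
    -- mask = (1 << (c1 + 1)) - 1
    let mask := ((1 : Int) <<< (c1 + 1).toNat) - 1
    -- num |= mask << (c0 - 1)
    let num2 := PySem.Int.bor num1 (mask <<< (c0 - 1).toNat)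
    PySem.Int.pyBin num2

-- ===== PORT B =====
def getPrev_alt (num : Int) : String :=
  let x := num + 1
  let u := x - PySem.Int.band x (x - 1)      -- lowest set bit of num + 1
  let m := num - u + 1                        -- num with its trailing ones cleared
  if m = 0 then "-1"  -- Python returns the int -1 here (not a str): outside Pre_
  else
    let v := m - PySem.Int.band m (m - 1)    -- lowest set bit of m
    PySem.Int.pyBin (m - PySem.Int.floordiv v (2 * u))

-- ===== PRECONDITION & SPEC =====
-- Pre_ excludes exactly num = -1 (A's first loop never terminates there) and
-- num ∈ {0} ∪ {2^k - 1} (A returns the int -1 there, not a binary string).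
def Pre_getPrev (num : Int) : Prop := PySem.Int.band num (num + 1) ≠ 0
instance (num : Int) : Decidable (Pre_getPrev num) := by unfold Pre_getPrev; infer_instance
def pvWitness_getPrev : Int := (5)

def Spec_getPrev (num : Int) (out : String) : Prop := out = getPrev_alt num
instance (num : Int) (out : String) : Decidable (Spec_getPrev num out) := by unfold Spec_getPrev; infer_instance

-- ===== CLAIM (what is proved, stated in full; the proofs are below) =====
def Claim_equal_getPrev : Prop := ∀ (num : Int), Dom_getPrev num → Pre_getPrev num → Spec_getPrev num (getPrev num)

-- ===== LEMMAS AND PROOFS =====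

-- Nat-level doubling laws for &&& and |||.
theorem natAndDouble (A B I J : Nat) (hi : I ≤ 1) (hj : J ≤ 1) :
    (2*A+I) &&& (2*B+J) = 2*(A &&& B) + min I J := by
  apply Nat.eq_of_testBit_eq
  intro k
  have h2 : (2*A+I)/2 = A := by omega
  have h3 : (2*B+J)/2 = B := by omega
  have h4 : (2*(A &&& B) + min I J)/2 = A &&& B := by omega
  cases k with
  | zero =>
    simp only [Nat.testBit_zero]
    interval_cases I <;> interval_cases J <;> simp
  | succ k =>
    rw [Nat.testBit_and, Nat.testBit_succ, Nat.testBit_succ, Nat.testBit_succ, h2, h3, h4,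
      Nat.testBit_and]

theorem natOrDouble (A B I J : Nat) (hi : I ≤ 1) (hj : J ≤ 1) :
    (2*A+I) ||| (2*B+J) = 2*(A ||| B) + max I J := by
  apply Nat.eq_of_testBit_eq
  intro k
  have h2 : (2*A+I)/2 = A := by omega
  have h3 : (2*B+J)/2 = B := by omega
  have h4 : (2*(A ||| B) + max I J)/2 = A ||| B := by omega
  cases k with
  | zero =>
    simp only [Nat.testBit_zero]
    interval_cases I <;> interval_cases J <;> simp
  | succ k =>
    rw [Nat.testBit_or, Nat.testBit_succ, Nat.testBit_succ, Nat.testBit_succ, h2, h3, h4,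
      Nat.testBit_or]

-- Int-level doubling laws for Python's & and |.
theorem bandDouble (a b i j : Int) (hi0 : 0 ≤ i) (hi1 : i ≤ 1) (hj0 : 0 ≤ j) (hj1 : j ≤ 1) :
    PySem.Int.band (2*a+i) (2*b+j) = 2 * PySem.Int.band a b + min i j := by
  unfold PySem.Int.band
  by_cases ha : 0 ≤ a <;> by_cases hb : 0 ≤ b
  · rw [if_pos (by omega), if_pos (by omega), if_pos ha, if_pos hb]
    rw [show (2*a+i).toNat = 2*a.toNat + i.toNat by omega,
        show (2*b+j).toNat = 2*b.toNat + j.toNat by omega,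
        natAndDouble _ _ _ _ (by omega) (by omega)]
    omega
  · rw [if_pos (by omega), if_neg (by omega), if_pos ha, if_neg hb]
    rw [show (2*a+i).toNat = 2*a.toNat + i.toNat by omega,
        show (-(2*b+j)-1).toNat = 2*(-b-1).toNat + (1-j).toNat by omega,
        natAndDouble _ _ _ _ (by omega) (by omega)]
    have := Nat.and_le_left (n := a.toNat) (m := (-b-1).toNat)
    omega
  · rw [if_neg (by omega), if_pos (by omega), if_neg ha, if_pos hb]
    rw [show (2*b+j).toNat = 2*b.toNat + j.toNat by omega,
        show (-(2*a+i)-1).toNat = 2*(-a-1).toNat + (1-i).toNat by omega,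
        natAndDouble _ _ _ _ (by omega) (by omega)]
    have := Nat.and_le_left (n := b.toNat) (m := (-a-1).toNat)
    omega
  · rw [if_neg (by omega), if_neg (by omega), if_neg ha, if_neg hb]
    rw [show (-(2*a+i)-1).toNat = 2*(-a-1).toNat + (1-i).toNat by omega,
        show (-(2*b+j)-1).toNat = 2*(-b-1).toNat + (1-j).toNat by omega,
        natOrDouble _ _ _ _ (by omega) (by omega)]
    omega

theorem borDouble (a b i j : Int) (hi0 : 0 ≤ i) (hi1 : i ≤ 1) (hj0 : 0 ≤ j) (hj1 : j ≤ 1) :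
    PySem.Int.bor (2*a+i) (2*b+j) = 2 * PySem.Int.bor a b + max i j := by
  unfold PySem.Int.bor
  by_cases ha : 0 ≤ a <;> by_cases hb : 0 ≤ b
  · rw [if_pos (by omega), if_pos (by omega), if_pos ha, if_pos hb]
    rw [show (2*a+i).toNat = 2*a.toNat + i.toNat by omega,
        show (2*b+j).toNat = 2*b.toNat + j.toNat by omega,
        natOrDouble _ _ _ _ (by omega) (by omega)]
    omega
  · rw [if_pos (by omega), if_neg (by omega), if_pos ha, if_neg hb]
    rw [show (-(2*b+j)-1).toNat = 2*(-b-1).toNat + (1-j).toNat by omega,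
        show (2*a+i).toNat = 2*a.toNat + i.toNat by omega,
        natAndDouble _ _ _ _ (by omega) (by omega)]
    have := Nat.and_le_left (n := (-b-1).toNat) (m := a.toNat)
    omega
  · rw [if_neg (by omega), if_pos (by omega), if_neg ha, if_pos hb]
    rw [show (-(2*a+i)-1).toNat = 2*(-a-1).toNat + (1-i).toNat by omega,
        show (2*b+j).toNat = 2*b.toNat + j.toNat by omega,
        natAndDouble _ _ _ _ (by omega) (by omega)]
    have := Nat.and_le_left (n := (-a-1).toNat) (m := b.toNat)
    omega
  · rw [if_neg (by omega), if_neg (by omega), if_neg ha, if_neg hb]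
    rw [show (-(2*a+i)-1).toNat = 2*(-a-1).toNat + (1-i).toNat by omega,
        show (-(2*b+j)-1).toNat = 2*(-b-1).toNat + (1-j).toNat by omega,
        natAndDouble _ _ _ _ (by omega) (by omega)]
    omega

-- a & ((~0) << k) clears the low k bits.
theorem bandClearLow : ∀ (k : Nat) (q r : Int), 0 ≤ r → r < 2^k →
    PySem.Int.band (2^k * q + r) (-(2^k)) = 2^k * q := by
  intro k
  induction k with
  | zero =>
    intro q r h0 h1
    rw [show ((2:Int)^0 * q + r) = q by omega, show (-((2:Int)^0)) = -1 by norm_num,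
      PySem.Int.band_neg_one]
    omega
  | succ k ih =>
    intro q r h0 h1
    have hp : (2:Int)^(k+1) = 2*2^k := by ring
    have hq : (2:Int)^(k+1) * q = 2*(2^k * q) := by rw [hp]; ring
    rw [show (2:Int)^(k+1) * q + r = 2*(2^k*q + r/2) + r%2 by omega,
        show (-((2:Int)^(k+1))) = 2*(-(2^k)) + 0 by omega,
        bandDouble _ _ _ _ (by omega) (by omega) (by omega) (by omega),
        ih q (r/2) (by omega) (by omega)]
    omega

-- (2^k * q) | r is addition when 0 ≤ r < 2^k.
theorem borDisjoint : ∀ (k : Nat) (q r : Int), 0 ≤ r → r < 2^k →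
    PySem.Int.bor (2^k * q) r = 2^k * q + r := by
  intro k
  induction k with
  | zero =>
    intro q r h0 h1
    rw [show r = 0 by omega, PySem.Int.bor_zero]
    omega
  | succ k ih =>
    intro q r h0 h1
    have hp : (2:Int)^(k+1) = 2*2^k := by ring
    have hq : (2:Int)^(k+1) * q = 2*(2^k * q) := by rw [hp]; ring
    rw [show (2:Int)^(k+1) * q = 2*(2^k*q) + 0 by omega,
        show r = 2*(r/2) + r%2 by omega,
        borDouble _ _ _ _ (by omega) (by omega) (by omega) (by omega),
        ih q (r/2) (by omega) (by omega)]
    omega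

-- x & (x - 1) clears the lowest set bit.
theorem bandClearLSB : ∀ (a : Nat) (e : Int), e % 2 = 1 →
    PySem.Int.band (2^a * e) (2^a * e - 1) = 2^a * e - 2^a := by
  intro a
  induction a with
  | zero =>
    intro e he
    obtain ⟨t, rfl⟩ : ∃ t, e = 2*t+1 := ⟨e/2, by omega⟩
    simp only [pow_zero, one_mul]
    rw [show (2:Int)*t+1-1 = 2*t+0 by ring,
        bandDouble _ _ _ _ (by omega) (by omega) (by omega) (by omega),
        PySem.Int.band_self]
    omega
  | succ a ih =>
    intro e he
    have hp : (2:Int)^(a+1) = 2*2^a := by ring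
    have hq : (2:Int)^(a+1) * e = 2*(2^a*e) := by rw [hp]; ring
    rw [show (2:Int)^(a+1) * e - 1 = 2*(2^a*e - 1) + 1 by omega,
        show (2:Int)^(a+1) * e = 2*(2^a*e) + 0 by omega,
        bandDouble _ _ _ _ (by omega) (by omega) (by omega) (by omega),
        ih e he]
    omega

-- a & 1 read through emod, and the halving shift.
theorem bandOneEmod (a : Int) : PySem.Int.band a 1 = a % 2 := by
  rw [PySem.Int.band_one, PySem.Int.mod_eq_emod_of_pos (by omega)]

theorem shrOne (a : Int) : a >>> (1:Nat) = a / 2 := by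
  rw [Int.shiftRight_eq_div_pow]; norm_num

-- A's first loop on input 1^c1-tail: strips the trailing ones.
theorem loop1_spec : ∀ (c1 f : Nat) (d c : Int), c1 < f → d % 2 = 0 →
    getPrevLoop1 f (2^c1 * d + (2^c1 - 1)) c = (d, c + c1) := by
  intro c1
  induction c1 with
  | zero =>
    intro f d c hf hd
    obtain ⟨f', rfl⟩ : ∃ f', f = f' + 1 := ⟨f - 1, by omega⟩
    show getPrevLoop1 (f'+1) (2^0 * d + (2^0 - 1)) c = (d, c + 0)
    rw [show (2:Int)^0 * d + (2^0 - 1) = d by omega]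
    unfold getPrevLoop1
    rw [if_neg (by rw [bandOneEmod]; omega)]
    norm_num
  | succ c1 ih =>
    intro f d c hf hd
    obtain ⟨f', rfl⟩ : ∃ f', f = f' + 1 := ⟨f - 1, by omega⟩
    have hp : (2:Int)^(c1+1) = 2*2^c1 := by ring
    have hq : (2:Int)^(c1+1) * d = 2*(2^c1*d) := by rw [hp]; ring
    unfold getPrevLoop1
    rw [if_pos (by rw [bandOneEmod]; omega), shrOne,
        show ((2:Int)^(c1+1) * d + (2^(c1+1) - 1)) / 2 = 2^c1 * d + (2^c1 - 1) by omega,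
        ih f' d (c+1) (by omega) hd]
    simp only [Prod.mk.injEq]
    refine ⟨trivial, by push_cast; ring⟩

-- A's second loop on input 2^c0 * odd: strips the zeros.
theorem loop2_spec : ∀ (c0 f : Nat) (e c : Int), c0 < f → e % 2 = 1 →
    getPrevLoop2 f (2^c0 * e) c = (e, c + c0) := by
  intro c0
  induction c0 with
  | zero =>
    intro f e c hf he
    obtain ⟨f', rfl⟩ : ∃ f', f = f' + 1 := ⟨f - 1, by omega⟩
    show getPrevLoop2 (f'+1) (2^0 * e) c = (e, c + 0)
    rw [show (2:Int)^0 * e = e by omega]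
    unfold getPrevLoop2
    rw [if_neg (by rw [bandOneEmod]; omega)]
    norm_num
  | succ c0 ih =>
    intro f e c hf he
    obtain ⟨f', rfl⟩ : ∃ f', f = f' + 1 := ⟨f - 1, by omega⟩
    have hp : (2:Int)^(c0+1) = 2*2^c0 := by ring
    have hq : (2:Int)^(c0+1) * e = 2*(2^c0*e) := by rw [hp]; ring
    unfold getPrevLoop2
    have hne0 : (2:Int)^c0 * e ≠ 0 := mul_ne_zero (by positivity) (by omega)
    rw [if_pos (⟨by rw [bandOneEmod]; omega, by omega⟩ : _ ∧ _), shrOne,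
        show ((2:Int)^(c0+1) * e) / 2 = 2^c0 * e by omega,
        ih f' e (c+1) (by omega) he]
    simp only [Prod.mk.injEq]
    refine ⟨trivial, by push_cast; ring⟩

-- Every nonzero integer is 2^a times an odd integer.
theorem oddFactor : ∀ (n : Nat) (y : Int), y ≠ 0 → y.natAbs ≤ n →
    ∃ (a : Nat) (e : Int), e % 2 = 1 ∧ y = 2^a * e := by
  intro n
  induction n with
  | zero => intro y hy hb; omega
  | succ n ih =>
    intro y hy hb
    by_cases hodd : y % 2 = 1
    · exact ⟨0, y, hodd, by omega⟩
    · obtain ⟨a, e, he, hye⟩ := ih (y/2) (by omega) (by omega)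
      refine ⟨a + 1, e, he, ?_⟩
      have h2 : (2:Int)^(a+1) * e = 2*(2^a*e) := by ring
      omega

-- 2^k as an Int is bounded by its exponent.
theorem expBound (k : Nat) (M : Nat) (h : (2:Int)^k ≤ 2^M) : k ≤ M := by
  by_contra hk
  have : (2:Int)^M < 2^k := by
    apply pow_lt_pow_right₀ (by norm_num) (by omega)
  omega

-- ===== VERDICT (by name: the statement is the Claim_ definition above) =====
theorem getPrev_spec : Claim_equal_getPrev := by
  intro num hdom hpre
  unfold Spec_getPrev
  have hdom' : -2147483648 ≤ num ∧ num ≤ 2147483648 := by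
    have := of_decide_eq_true hdom
    exact this
  -- num ≠ -1: otherwise band num (num+1) = band (-1) 0 = 0
  have hne : num ≠ -1 := by
    intro h
    apply hpre
    rw [h]
    norm_num [PySem.Int.band_zero]
  -- decompose num + 1 = 2^c1 * e with e odd
  obtain ⟨c1, e, he, hx⟩ := oddFactor (num+1).natAbs (num+1) (by omega) le_rfl
  have hc1pow : (2:Int)^c1 ≤ 2^32 := by
    have h1 : (2:Int)^c1 ≤ 2^c1 * |e| :=
      le_mul_of_one_le_right (by positivity) (Int.one_le_abs (by omega))
    have h2 : (2:Int)^c1 * |e| = |num + 1| := by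
      rw [hx, abs_mul, abs_of_nonneg (a := (2:Int)^c1) (by positivity)]
    have h3 : |num + 1| ≤ 2^32 := abs_le.mpr ⟨by omega, by omega⟩
    omega
  have hc1 : c1 ≤ 32 := expBound c1 32 hc1pow
  -- A's first loop: num = 2^c1 * (e-1) + (2^c1 - 1)
  have hnum : num = 2^c1 * (e - 1) + ((2:Int)^c1 - 1) := by
    have : (2:Int)^c1 * (e - 1) = 2^c1 * e - 2^c1 := by ring
    omega
  have hl1 : getPrevLoop1 64 num 0 = (e - 1, (0:Int) + c1) := by
    rw [hnum]
    exact loop1_spec c1 64 (e-1) 0 (by omega) (by omega)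
  -- e = 1 would contradict Pre_ — but we do not need that: both return "-1" then.
  by_cases he1 : e = 1
  · -- A: loop1 yields temp = 0, so A returns "-1"; B: m = 0, so B returns "-1".
    have hA : getPrev num = "-1" := by
      unfold getPrev
      rw [hl1]
      simp [he1]
    have hB : getPrev_alt num = "-1" := by
      have hE : (2:Int)^c1 * e = 2^c1 := by rw [he1, mul_one]
      unfold getPrev_alt
      simp only
      rw [show num + 1 = 2^c1 * e from hx, bandClearLSB c1 e he]
      rw [if_pos (by omega)]
    rw [hA, hB]
  · -- the generic case: e odd, e ≠ 1, so e - 1 = 2^c0 * m with m odd and c0 ≥ 1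
    obtain ⟨c0, m, hm, hem⟩ := oddFactor (e-1).natAbs (e-1) (by omega) le_rfl
    have hc0ge1 : 1 ≤ c0 := by
      by_contra h
      have : c0 = 0 := by omega
      rw [this] at hem
      omega
    have hc0pow : (2:Int)^c0 ≤ 2^34 := by
      have h1 : (2:Int)^c0 ≤ 2^c0 * |m| :=
        le_mul_of_one_le_right (by positivity) (Int.one_le_abs (by omega))
      have h2 : (2:Int)^c0 * |m| = |e - 1| := by
        rw [hem, abs_mul, abs_of_nonneg (a := (2:Int)^c0) (by positivity)]
      have h3 : |e - 1| ≤ 2^34 := by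
        have hcpos : (1:Int) ≤ 2^c1 := one_le_pow₀ (by omega)
        have h6 : |e| ≤ |e| * 2^c1 := le_mul_of_one_le_right (abs_nonneg e) hcpos
        have h4 : |e| * 2^c1 = |num + 1| := by
          rw [mul_comm, ← abs_of_nonneg (a := (2:Int)^c1) (by positivity), ← abs_mul, ← hx]
        have h5 : |num + 1| ≤ 2^32 := abs_le.mpr ⟨by omega, by omega⟩
        have h7 : |e - 1| ≤ |e| + 1 := by
          rcases abs_cases e with ⟨h8,_⟩|⟨h8,_⟩ <;> rcases abs_cases (e-1) with ⟨h9,_⟩|⟨h9,_⟩ <;> omega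
        omega
      omega
    have hc0 : c0 ≤ 34 := expBound c0 34 hc0pow
    -- abbreviations
    set p : Nat := c1 + c0 with hp
    have hpow : (2:Int)^p = 2^c1 * 2^c0 := by rw [hp, pow_add]
    have hnum2 : num = 2^p * m + ((2:Int)^c1 - 1) := by
      have h8 : (2:Int)^p * m = 2^c1 * (2^c0 * m) := by rw [hpow]; ring
      have h9 : (2:Int)^c1 * (2^c0 * m) = 2^c1 * (e - 1) := by rw [← hem]
      omega
    have hmodd : m % 2 = 1 := hm
    have hl2 : getPrevLoop2 64 (e - 1) 0 = (m, (0:Int) + c0) := by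
      rw [hem]
      exact loop2_spec c0 64 m 0 (by omega) hmodd
    have hd0 : e - 1 ≠ 0 := by omega
    -- A's value
    have hc1pos : (0:Int) < 2^c1 := by positivity
    have hc0pos : (0:Int) < 2^c0 := by positivity
    have hppos : (0:Int) < 2^p := by rw [hpow]; positivity
    have hX : m = 2 * (m / 2) + 1 := by omega
    have hA : getPrev num = PySem.Int.pyBin (2^(p+1) * (m/2) + 2^p - 2^(c0-1)) := by
      unfold getPrev
      rw [hl1]
      simp only
      rw [if_neg hd0, hl2]
      simp only
      have ht1 : (((0:Int) + c0) + ((0:Int) + c1) + 1).toNat = p + 1 := by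
        simp only [hp]; omega
      have ht2 : (((0:Int) + c1) + 1).toNat = c1 + 1 := by omega
      have ht3 : (((0:Int) + c0) - 1).toNat = c0 - 1 := by omega
      rw [ht1, ht2, ht3]
      rw [show (Int.not 0) = -1 from rfl, Int.shiftLeft_eq, Int.shiftLeft_eq, Int.shiftLeft_eq]
      rw [show (-1:Int) * 2^(p+1) = -(2^(p+1)) by ring]
      simp only [one_mul]
      -- num = 2^(p+1) * (m/2) + r with r = 2^p + 2^c1 - 1 < 2^(p+1)
      have hsplit : num = 2^(p+1) * (m/2) + ((2:Int)^p + 2^c1 - 1) := by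
        have h2 : (2:Int)^p * m = 2^p * (2 * (m/2) + 1) := by rw [← hX]
        have h3 : (2:Int)^p * (2 * (m/2) + 1) = 2*2^p*(m/2) + 2^p := by ring
        have h4 : (2:Int)^(p+1) * (m/2) = 2*2^p*(m/2) := by ring
        omega
      have hc1lep : (2:Int)^c1 ≤ 2^p := by
        apply pow_le_pow_right₀ (by norm_num) (by omega)
      have hrlt : (2:Int)^p + 2^c1 - 1 < 2^(p+1) := by
        have : (2:Int)^(p+1) = 2 * 2^p := by ring
        omega
      rw [hsplit, bandClearLow (p+1) (m/2) _ (by omega) hrlt]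
      -- the or: mask * 2^(c0-1) = 2^p - 2^(c0-1)
      have hmask : ((2:Int)^(c1+1) - 1) * 2^(c0-1) = 2^p - 2^(c0-1) := by
        have h6 : (2:Int)^(c1+1) * 2^(c0-1) = 2^p := by
          rw [← pow_add]
          congr 1
          omega
        calc ((2:Int)^(c1+1) - 1) * 2^(c0-1)
            = 2^(c1+1)*2^(c0-1) - 2^(c0-1) := by ring
          _ = 2^p - 2^(c0-1) := by rw [h6]
      have hc0m1 : (2:Int)^(c0-1) ≤ 2^p := by
        apply pow_le_pow_right₀ (by norm_num) (by omega)
      have hc0m1pos : (0:Int) < 2^(c0-1) := by positivity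
      have hplt : (2:Int)^p - 2^(c0-1) < 2^(p+1) := by
        have h10 : (2:Int)^(p+1) = 2 * 2^p := by ring
        omega
      rw [hmask, borDisjoint (p+1) (m/2) _ (by omega) hplt]
      congr 1
      omega
    -- B's value
    have hB : getPrev_alt num = PySem.Int.pyBin (2^p * m - 2^(c0-1)) := by
      unfold getPrev_alt
      simp only
      have hxm1 : num + 1 - 1 = 2^c1 * e - 1 := by omega
      rw [show num + 1 = 2^c1 * e from hx, bandClearLSB c1 e he]
      have hmval : num - (2^c1 * e - (2^c1 * e - 2^c1)) + 1 = 2^p * m := by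
        have h8 : (2:Int)^p * m = 2^c1 * (2^c0 * m) := by rw [hpow]; ring
        have h9 : (2:Int)^c1 * (2^c0 * m) = 2^c1 * (e - 1) := by rw [← hem]
        omega
      rw [hmval]
      rw [if_neg (mul_ne_zero (by positivity) (by omega : m ≠ 0) : (2:Int)^p * m ≠ 0)]
      rw [bandClearLSB p m hmodd]
      have hu : 2^c1 * e - (2^c1 * e - (2:Int)^c1) = 2^c1 := by ring
      rw [hu]
      have hv : (2:Int)^p * m - (2^p * m - 2^p) = 2^p := by ring
      rw [hv]
      have hdiv : PySem.Int.floordiv (2^p) (2 * 2^c1) = (2:Int)^(c0-1) := by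
        rw [PySem.Int.floordiv_eq_ediv_of_pos (by positivity)]
        have : (2:Int)^p = 2^(c0-1) * (2 * 2^c1) := by
          rw [show (2:Int) * 2^c1 = 2^(c1+1) by ring, ← pow_add]
          congr 1
          omega
        rw [this]
        exact Int.mul_ediv_cancel _ (by positivity)
      rw [hdiv]
    rw [hA, hB]
    congr 1
    have h4 : (2:Int)^(p+1) * (m/2) = 2 * (2^p * (m/2)) := by ring
    have h5 : (2:Int)^p * m = 2 * (2^p * (m/2)) + 2^p := by
      conv_lhs => rw [hX]
      ring
    omega
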